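-- pv_equiv track=rewrite | github.com/jhd8593/DeaconsDuel7s | generate_json.py | assign_pools
-- ===== SOURCE A (Python) =====
-- def assign_pools(teams):
--     pools = {
--         'A': ['Duke', 'Belmont Abbey', 'VTech I', 'UVA'],
--         'B': ['Queens', 'UNCW', 'VTech II', 'USC'],
--         'C': ['App State', 'Clemson', 'Wake', 'UNC Charlotte']
--     }
--
--     pool_dict = {}
--     for pool_label, roster in pools.items():
--         pool_dict[pool_label] = [
--             t for t in teams if t['name'] in roster
--         ]
--
--     return pool_dict
-- ===== SOURCE B (Python) =====
-- def assign_pools(teams):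
--     rosters = {
--         'A': ['Duke', 'Belmont Abbey', 'VTech I', 'UVA'],
--         'B': ['Queens', 'UNCW', 'VTech II', 'USC'],
--         'C': ['App State', 'Clemson', 'Wake', 'UNC Charlotte']
--     }
--     index = {name: label for label, roster in rosters.items() for name in roster}
--     result = {label: [] for label in rosters}
--     for t in teams:
--         label = index.get(t['name'])
--         if label is not None:
--             result[label].append(t)
--     return result
-- ===== Notes on version B (the rewrite author's own statement) =====
-- stated objective: idiomatic
-- what changed: A scans the whole teams list once per pool (three filter passes); B builds a name-to-pool reverse index once and makes a single pass over teams, appending each team to its pool's list.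
import Mathlib
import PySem

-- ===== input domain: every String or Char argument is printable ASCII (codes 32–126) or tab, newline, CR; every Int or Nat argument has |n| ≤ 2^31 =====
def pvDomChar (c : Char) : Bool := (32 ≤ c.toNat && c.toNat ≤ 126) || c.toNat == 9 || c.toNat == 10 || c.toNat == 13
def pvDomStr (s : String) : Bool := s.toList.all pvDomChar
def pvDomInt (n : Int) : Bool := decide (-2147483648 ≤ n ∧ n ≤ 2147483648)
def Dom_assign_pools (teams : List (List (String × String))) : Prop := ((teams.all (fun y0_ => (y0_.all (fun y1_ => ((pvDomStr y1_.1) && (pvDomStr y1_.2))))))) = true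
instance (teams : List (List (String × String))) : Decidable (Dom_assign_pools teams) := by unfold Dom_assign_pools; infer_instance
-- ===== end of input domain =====

-- ===== PORT A =====
-- B differs from A on the return value only; neither mutates its argument.
-- A scans `teams` once per pool with a membership filter against that pool's roster.
def pvRosterA : List String := ["Duke", "Belmont Abbey", "VTech I", "UVA"]
def pvRosterB : List String := ["Queens", "UNCW", "VTech II", "USC"]
def pvRosterC : List String := ["App State", "Clemson", "Wake", "UNC Charlotte"]

def pvName (t : List (String × String)) : String := (PySem.Dict.mk t).getD "name" ""

def assign_pools (teams : List (List (String × String))) : List (String × List (List (String × String))) :=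
  (((PySem.Dict.empty
      |>.insert "A" (teams.filter (fun t => pvRosterA.contains (pvName t))))
      |>.insert "B" (teams.filter (fun t => pvRosterB.contains (pvName t))))
      |>.insert "C" (teams.filter (fun t => pvRosterC.contains (pvName t)))).items

-- ===== PORT B =====
-- B builds a reverse index name -> pool label once, then makes a single pass over teams.
def pvPools : List (String × List String) := [("A", pvRosterA), ("B", pvRosterB), ("C", pvRosterC)]

def pvIndex : PySem.Dict String String :=
  PySem.Dict.ofList (pvPools.flatMap (fun p => p.2.map (fun n => (n, p.1))))

def assign_pools_alt (teams : List (List (String × String))) : List (String × List (List (String × String))) :=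
  (teams.foldl
    (fun d t =>
      (pvIndex.get? (pvName t)).elim d (fun lbl => d.modify lbl [] (fun l => l ++ [t])))
    (PySem.Dict.ofList (pvPools.map (fun p => (p.1, ([] : List (List (String × String)))))))).items

-- ===== PRECONDITION & SPEC =====
-- Pre_ excludes exactly the teams lacking a 'name' key, on which Python A raises KeyError.
def Pre_assign_pools (teams : List (List (String × String))) : Prop :=
  teams.all (fun t => (PySem.Dict.mk t).contains "name") = true
instance (teams : List (List (String × String))) : Decidable (Pre_assign_pools teams) := by unfold Pre_assign_pools; infer_instance
def pvWitness_assign_pools : (List (List (String × String))) := [[("name", "Duke")], [("name", "Nobody")]]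

def Spec_assign_pools (teams : List (List (String × String))) (out : List (String × List (List (String × String)))) : Prop := out = assign_pools_alt teams
instance (teams : List (List (String × String))) (out : List (String × List (List (String × String)))) : Decidable (Spec_assign_pools teams out) := by unfold Spec_assign_pools; infer_instance

-- ===== CLAIM (what is proved, stated in full; the proofs are below) =====
def Claim_equal_assign_pools : Prop := ∀ (teams : List (List (String × String))), Dom_assign_pools teams → Pre_assign_pools teams → Spec_assign_pools teams (assign_pools teams)

-- ===== LEMMAS AND PROOFS =====

-- The reverse index evaluates to this literal association list.
lemma pvIndex_eq : pvIndex = PySem.Dict.mk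
    [("Duke", "A"), ("Belmont Abbey", "A"), ("VTech I", "A"), ("UVA", "A"),
     ("Queens", "B"), ("UNCW", "B"), ("VTech II", "B"), ("USC", "B"),
     ("App State", "C"), ("Clemson", "C"), ("Wake", "C"), ("UNC Charlotte", "C")] := by decide

-- The concrete reverse index answers exactly "which roster contains n".
lemma pvIndex_get (n : String) : pvIndex.get? n =
    if n ∈ pvRosterA then some "A"
    else if n ∈ pvRosterB then some "B"
    else if n ∈ pvRosterC then some "C"
    else none := by
  by_cases hA : n ∈ pvRosterA
  · rw [if_pos hA]
    simp only [pvRosterA, List.mem_cons, List.not_mem_nil, or_false] at hA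
    rcases hA with h | h | h | h <;> subst h <;> decide
  · rw [if_neg hA]
    by_cases hB : n ∈ pvRosterB
    · rw [if_pos hB]
      simp only [pvRosterB, List.mem_cons, List.not_mem_nil, or_false] at hB
      rcases hB with h | h | h | h <;> subst h <;> decide
    · rw [if_neg hB]
      by_cases hC : n ∈ pvRosterC
      · rw [if_pos hC]
        simp only [pvRosterC, List.mem_cons, List.not_mem_nil, or_false] at hC
        rcases hC with h | h | h | h <;> subst h <;> decide
      · rw [if_neg hC, pvIndex_eq]
        simp only [pvRosterA, pvRosterB, pvRosterC, List.mem_cons, List.not_mem_nil,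
          or_false, not_or] at hA hB hC
        obtain ⟨a1, a2, a3, a4⟩ := hA
        obtain ⟨b1, b2, b3, b4⟩ := hB
        obtain ⟨c1, c2, c3, c4⟩ := hC
        simp only [PySem.Dict.get?_mk_cons, beq_iff_eq]
        rw [if_neg (fun h => a1 h.symm), if_neg (fun h => a2 h.symm),
            if_neg (fun h => a3 h.symm), if_neg (fun h => a4 h.symm),
            if_neg (fun h => b1 h.symm), if_neg (fun h => b2 h.symm),
            if_neg (fun h => b3 h.symm), if_neg (fun h => b4 h.symm),
            if_neg (fun h => c1 h.symm), if_neg (fun h => c2 h.symm),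
            if_neg (fun h => c3 h.symm), if_neg (fun h => c4 h.symm)]
        rfl

-- Membership in one roster excludes the other two.
lemma roster_disjA {n : String} (h : n ∈ pvRosterA) : n ∉ pvRosterB ∧ n ∉ pvRosterC := by
  simp only [pvRosterA, List.mem_cons, List.not_mem_nil, or_false] at h
  rcases h with h | h | h | h <;> subst h <;> decide
lemma roster_disjB {n : String} (h : n ∈ pvRosterB) : n ∉ pvRosterA ∧ n ∉ pvRosterC := by
  simp only [pvRosterB, List.mem_cons, List.not_mem_nil, or_false] at h
  rcases h with h | h | h | h <;> subst h <;> decide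
lemma roster_disjC {n : String} (h : n ∈ pvRosterC) : n ∉ pvRosterA ∧ n ∉ pvRosterB := by
  simp only [pvRosterC, List.mem_cons, List.not_mem_nil, or_false] at h
  rcases h with h | h | h | h <;> subst h <;> decide

-- Loop invariant for B's single pass, with the three accumulators generalized.
lemma alt_fold_inv (teams : List (List (String × String))) (la lb lc : List (List (String × String))) :
    teams.foldl
      (fun d t =>
        (pvIndex.get? (pvName t)).elim d (fun lbl => d.modify lbl [] (fun l => l ++ [t])))
      (PySem.Dict.mk [("A", la), ("B", lb), ("C", lc)]) =
    PySem.Dict.mk [("A", la ++ teams.filter (fun t => pvRosterA.contains (pvName t))),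
                   ("B", lb ++ teams.filter (fun t => pvRosterB.contains (pvName t))),
                   ("C", lc ++ teams.filter (fun t => pvRosterC.contains (pvName t)))] := by
  induction teams generalizing la lb lc with
  | nil => simp [List.filter]
  | cons t ts ih =>
    simp only [List.foldl_cons, List.filter_cons]
    have hget := pvIndex_get (pvName t)
    rcases hidx : pvIndex.get? (pvName t) with _ | lbl <;>
      rw [hidx] at hget <;> simp only [Option.elim_none, Option.elim_some]
    · -- no pool matched: the dict is unchanged and all three filters drop t
      have h3 : pvName t ∉ pvRosterA ∧ pvName t ∉ pvRosterB ∧ pvName t ∉ pvRosterC := by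
        split_ifs at hget with h1 h2 h3
        exact ⟨h1, h2, h3⟩
      rw [ih]
      simp [h3.1, h3.2.1, h3.2.2]
    · -- t's name is in exactly one roster; reduce the modify on the literal dict
      split_ifs at hget with h1 h2 h3
      · obtain ⟨hB, hC⟩ := roster_disjA h1
        cases hget
        have hm : (PySem.Dict.mk [("A", la), ("B", lb), ("C", lc)]).modify "A" []
            (fun l => l ++ [t]) = PySem.Dict.mk [("A", la ++ [t]), ("B", lb), ("C", lc)] := rfl
        rw [hm, ih]
        simp [h1, hB, hC, List.append_assoc]
      · obtain ⟨hA, hC⟩ := roster_disjB h2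
        cases hget
        have hm : (PySem.Dict.mk [("A", la), ("B", lb), ("C", lc)]).modify "B" []
            (fun l => l ++ [t]) = PySem.Dict.mk [("A", la), ("B", lb ++ [t]), ("C", lc)] := rfl
        rw [hm, ih]
        simp [h1, h2, hC, List.append_assoc]
      · obtain ⟨hA, hB⟩ := roster_disjC h3
        cases hget
        have hm : (PySem.Dict.mk [("A", la), ("B", lb), ("C", lc)]).modify "C" []
            (fun l => l ++ [t]) = PySem.Dict.mk [("A", la), ("B", lb), ("C", lc ++ [t])] := rfl
        rw [hm, ih]
        simp [h1, h2, h3, List.append_assoc]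

-- ===== VERDICT (by name: the statement is the Claim_ definition above) =====
theorem assign_pools_spec : Claim_equal_assign_pools := by
  intro teams _ _
  unfold Spec_assign_pools assign_pools assign_pools_alt
  rw [show PySem.Dict.ofList (pvPools.map (fun p => (p.1, ([] : List (List (String × String)))))) =
        PySem.Dict.mk [("A", []), ("B", []), ("C", [])] from by decide,
      alt_fold_inv]
  rfl
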